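-- pv_equiv track=rewrite | github.com/pypi-data/pypi-mirror-382 | packages/chunky-files/chunky_files-1.0.0.tar.gz/chunky_files-1.0.0/src/chunky/chunkers/text.py | _find_paragraphs
-- ===== SOURCE A (Python) =====
-- from typing import List, Optional
--
-- def _find_paragraphs(lines: List[str]) -> List[tuple[int, int]]:
--     paragraphs: List[tuple[int, int]] = []
--     start = 0
--     for idx, line in enumerate(lines):
--         if line.strip():
--             continue
--         if start < idx:
--             paragraphs.append((start, idx))
--         start = idx + 1
--     if start < len(lines):
--         paragraphs.append((start, len(lines)))
--     return paragraphs
-- ===== SOURCE B (Python) =====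
-- from typing import List
--
-- def _find_paragraphs(lines: List[str]) -> List[tuple[int, int]]:
--     seps = [i for i, line in enumerate(lines) if not line.strip()]
--     bounds = [-1] + seps + [len(lines)]
--     out: List[tuple[int, int]] = []
--     for a, b in zip(bounds, bounds[1:]):
--         if a + 1 < b:
--             out.append((a + 1, b))
--     return out
-- ===== Notes on version B (the rewrite author's own statement) =====
-- stated objective: alternative
-- what changed: Instead of tracking a running paragraph start while looping, B first collects all blank-line indices as separators, brackets them with -1 and len(lines), and emits (a+1, b) for each consecutive boundary pair with a+1 < b.
import Mathlib
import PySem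

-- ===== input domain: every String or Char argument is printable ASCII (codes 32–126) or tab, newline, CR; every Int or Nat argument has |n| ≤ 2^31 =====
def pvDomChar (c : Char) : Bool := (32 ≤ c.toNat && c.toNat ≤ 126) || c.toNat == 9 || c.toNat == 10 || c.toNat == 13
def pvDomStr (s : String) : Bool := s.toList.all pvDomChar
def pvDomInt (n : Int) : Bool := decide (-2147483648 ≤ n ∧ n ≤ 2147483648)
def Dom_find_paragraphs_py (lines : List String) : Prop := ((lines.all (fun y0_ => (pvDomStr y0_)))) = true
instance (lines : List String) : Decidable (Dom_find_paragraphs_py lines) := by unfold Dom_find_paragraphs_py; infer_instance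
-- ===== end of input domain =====

-- B collects blank-line indices first and emits ranges between consecutive boundaries; same values as A, no speed claim.

-- ===== PORT A =====
-- the 'for idx, line in enumerate(lines)' loop of A, state = (paragraphs, start)
def pvALoop : Int → List String → List (Int × Int) → Int → (List (Int × Int) × Int)
  | _, [], paras, start => (paras, start)
  | idx, line :: rest, paras, start =>
    if PySem.Str.strip line ≠ "" then
      pvALoop (idx + 1) rest paras start
    else
      pvALoop (idx + 1) rest (if start < idx then paras ++ [(start, idx)] else paras) (idx + 1)

def find_paragraphs_py (lines : List String) : List (Int × Int) :=
  let r := pvALoop 0 lines [] 0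
  if r.2 < (lines.length : Int) then r.1 ++ [(r.2, (lines.length : Int))] else r.1

-- ===== PORT B =====
-- the list comprehension '[i for i, line in enumerate(lines) if not line.strip()]'
def pvSeps : Int → List String → List Int
  | _, [] => []
  | idx, line :: rest =>
    if PySem.Str.strip line = "" then idx :: pvSeps (idx + 1) rest else pvSeps (idx + 1) rest

-- the 'for a, b in zip(bounds, bounds[1:])' loop (appends in order)
def pvBLoop : List (Int × Int) → List (Int × Int)
  | [] => []
  | (a, b) :: rest => if a + 1 < b then (a + 1, b) :: pvBLoop rest else pvBLoop rest

def find_paragraphs_py_alt (lines : List String) : List (Int × Int) :=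
  let bounds : List Int := (-1 : Int) :: (pvSeps 0 lines ++ [(lines.length : Int)])
  pvBLoop (bounds.zip bounds.tail)

-- ===== PRECONDITION & SPEC =====
def Spec_find_paragraphs_py (lines : List String) (out : List (Int × Int)) : Prop := out = find_paragraphs_py_alt lines
instance (lines : List String) (out : List (Int × Int)) : Decidable (Spec_find_paragraphs_py lines out) := by unfold Spec_find_paragraphs_py; infer_instance

-- ===== CLAIM (what is proved, stated in full; the proofs are below) =====
def Claim_equal_find_paragraphs_py : Prop := ∀ (lines : List String), Dom_find_paragraphs_py lines → Spec_find_paragraphs_py lines (find_paragraphs_py lines)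

-- ===== LEMMAS AND PROOFS =====

-- reference 'walk' over separators: ranges between consecutive boundaries prev, seps…, fin
def pvWalk : Int → List Int → Int → List (Int × Int)
  | prev, [], fin => if prev + 1 < fin then [(prev + 1, fin)] else []
  | prev, s :: ss, fin => (if prev + 1 < s then [(prev + 1, s)] else []) ++ pvWalk s ss fin

theorem pvBLoop_eq_walk (seps : List Int) (prev fin : Int) :
    pvBLoop ((prev :: (seps ++ [fin])).zip (seps ++ [fin])) = pvWalk prev seps fin := by
  induction seps generalizing prev with
  | nil =>
    simp only [List.nil_append, List.zip_cons_cons, List.zip_nil_right, pvBLoop, pvWalk]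
  | cons s ss ih =>
    simp only [List.cons_append, List.zip_cons_cons, pvBLoop, pvWalk]
    rw [ih s]
    split_ifs <;> simp

theorem pvALoop_eq_walk (lines : List String) (idx start : Int) (paras : List (Int × Int)) :
    (if (pvALoop idx lines paras start).2 < idx + (lines.length : Int) then
        (pvALoop idx lines paras start).1 ++ [((pvALoop idx lines paras start).2, idx + (lines.length : Int))]
      else (pvALoop idx lines paras start).1)
    = paras ++ pvWalk (start - 1) (pvSeps idx lines) (idx + (lines.length : Int)) := by
  induction lines generalizing idx start paras with
  | nil =>
    simp only [pvALoop, pvSeps, pvWalk, List.length_nil, Int.natCast_zero, add_zero]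
    have h : start - 1 + 1 = start := by omega
    rw [h]
    split_ifs <;> simp
  | cons line rest ih =>
    simp only [pvALoop, pvSeps, List.length_cons, Nat.cast_add, Nat.cast_one]
    by_cases hb : PySem.Str.strip line = ""
    · have e1 : (if PySem.Str.strip line ≠ "" then pvALoop (idx + 1) rest paras start
          else pvALoop (idx + 1) rest (if start < idx then paras ++ [(start, idx)] else paras) (idx + 1))
          = pvALoop (idx + 1) rest (if start < idx then paras ++ [(start, idx)] else paras) (idx + 1) :=
        if_neg (by simp [hb])
      rw [e1, if_pos hb]
      have harith : idx + ((rest.length : Int) + 1) = (idx + 1) + (rest.length : Int) := by ring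
      rw [harith, ih (idx + 1) (idx + 1)]
      simp only [pvWalk]
      have h1 : start - 1 + 1 = start := by ring
      have h2 : (idx + 1) - 1 = idx := by ring
      rw [h1, h2]
      split_ifs <;> simp
    · have e1 : (if PySem.Str.strip line ≠ "" then pvALoop (idx + 1) rest paras start
          else pvALoop (idx + 1) rest (if start < idx then paras ++ [(start, idx)] else paras) (idx + 1))
          = pvALoop (idx + 1) rest paras start := if_pos hb
      rw [e1, if_neg hb]
      have harith : idx + ((rest.length : Int) + 1) = (idx + 1) + (rest.length : Int) := by ring
      rw [harith, ih (idx + 1) start]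

-- ===== VERDICT (by name: the statement is the Claim_ definition above) =====
theorem find_paragraphs_py_spec : Claim_equal_find_paragraphs_py := by
  intro lines _
  unfold Spec_find_paragraphs_py find_paragraphs_py find_paragraphs_py_alt
  simp only [List.tail_cons]
  rw [pvBLoop_eq_walk]
  have := pvALoop_eq_walk lines 0 0 []
  simp only [zero_add, List.nil_append] at this
  have h0 : (0 : Int) - 1 = -1 := by omega
  rw [h0] at this
  exact this
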